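-- pv_equiv track=rewrite | github.com/heechan12/excel_calculator | sip_parser.py | parse_sip_headers
-- ===== SOURCE A (Python) =====
-- def parse_sip_headers(headers_str):
--     headers = {}
--     header_lines = headers_str.split('\r\n')
--     for line in header_lines:
--         if ': ' in line:
--             key, value = line.split(': ', 1)
--             headers[key] = value
--         elif len(line.strip()) > 0:  # Handling folded headers
--             if headers:
--                 headers[list(headers.keys())[-1]] += ' ' + line.strip()
--     return headers
-- ===== SOURCE B (Python) =====
-- def parse_sip_headers(headers_str):
--     # Scan the lines BACK TO FRONT: folded continuation text is accumulated in
--     # `pending` until the header line that owns it is reached; pending text with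
--     # no header line before it (in forward order) is discarded when the scan ends.
--     rev_pairs = []
--     pending = ''
--     for line in reversed(headers_str.split('\r\n')):
--         if ': ' in line:
--             key, value = line.split(': ', 1)
--             rev_pairs.append((key, value + pending))
--             pending = ''
--         elif line.strip():
--             pending = ' ' + line.strip() + pending
--     headers = {}
--     for key, value in reversed(rev_pairs):
--         headers[key] = value
--     return headers
-- ===== Notes on version B (the rewrite author's own statement) =====
-- stated objective: alternative
-- what changed: A walks the lines forward, mutating a dict and patching folded lines into whatever key the dict inserted last; B scans the lines BACK TO FRONT with a pending-continuation accumulator, emitting each (key, value+pending) pair exactly once with no patch-the-previous-entry step, then builds the dict from the reversed pair list. Pre_ excludes blocks where a folded continuation follows a header whose key already occurred earlier: there A attaches the fold to the dict's last-inserted key while B attaches it to the immediately preceding header line, and with duplicate keys neither owner is specified.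
import Mathlib
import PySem

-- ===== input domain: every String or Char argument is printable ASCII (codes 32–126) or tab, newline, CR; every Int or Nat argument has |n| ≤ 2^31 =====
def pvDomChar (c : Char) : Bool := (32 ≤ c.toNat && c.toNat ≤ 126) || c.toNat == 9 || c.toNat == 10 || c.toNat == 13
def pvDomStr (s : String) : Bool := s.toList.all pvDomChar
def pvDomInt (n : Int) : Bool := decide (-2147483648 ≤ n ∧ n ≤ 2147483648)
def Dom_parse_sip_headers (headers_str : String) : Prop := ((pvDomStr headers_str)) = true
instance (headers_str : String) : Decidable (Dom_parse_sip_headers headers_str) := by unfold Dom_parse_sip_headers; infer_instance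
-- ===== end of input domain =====

-- B scans the lines back to front with a pending-continuation accumulator (no
-- patch-the-previous-entry step), then builds the dict from the reversed pair list,
-- instead of A's forward pass that mutates the dict through its last inserted key.

def pvCRLF : List Char := ['\r', '\n']
def pvColonSp : List Char := [':', ' ']

-- ===== PORT A =====
-- one iteration of A's for-loop over header_lines
def pvAstep (headers : PySem.Dict (List Char) (List Char)) (line : List Char) :
    PySem.Dict (List Char) (List Char) :=
  if PySem.Chars.isIn pvColonSp line then
    match PySem.Chars.splitOnMax line pvColonSp 1 with
    | [key, value] => headers.insert key value
    | _ => headers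
  else if 0 < (PySem.Chars.strip line).length then
    -- 'if headers: headers[list(headers.keys())[-1]] += …' — pyGet? keys (-1) is none iff headers is empty
    match PySem.List.pyGet? headers.keys (-1) with
    | some k => headers.modify k [] (fun v => v ++ ' ' :: PySem.Chars.strip line)
    | none => headers
  else headers

def parse_sip_headers (headers_str : String) : List (String × String) :=
  ((PySem.Chars.splitOn headers_str.toList pvCRLF).foldl pvAstep PySem.Dict.empty).items.map
    (fun p => (String.ofList p.1, String.ofList p.2))

-- ===== PORT B =====
-- B's backwards loop: recursion over the reversed line list, carrying `pending`
-- (the continuation text accumulated so far); emits pairs in reverse order.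
def pvRevScan : List (List Char) → List Char → List (List Char × List Char)
  | [], _ => []
  | line :: rest, pending =>
    if PySem.Chars.isIn pvColonSp line then
      match PySem.Chars.splitOnMax line pvColonSp 1 with
      | [key, value] => (key, value ++ pending) :: pvRevScan rest []
      | _ => pvRevScan rest pending
    else if 0 < (PySem.Chars.strip line).length then
      pvRevScan rest ((' ' :: PySem.Chars.strip line) ++ pending)
    else pvRevScan rest pending

-- B's second loop: build the dict from the pairs in forward order
def pvDictOf (pairs : List (List Char × List Char)) : PySem.Dict (List Char) (List Char) :=
  pairs.foldl (fun d p => d.insert p.1 p.2) PySem.Dict.empty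

def parse_sip_headers_alt (headers_str : String) : List (String × String) :=
  (pvDictOf ((pvRevScan (PySem.Chars.splitOn headers_str.toList pvCRLF).reverse []).reverse)).items.map
    (fun p => (String.ofList p.1, String.ofList p.2))

-- ===== PRECONDITION & SPEC =====
-- Pre_ excludes blocks where a folded continuation line follows a header whose key already
-- occurred earlier (the dict's last *inserted* key then differs from the preceding header
-- line's key): there A attaches the fold to the last-inserted key's value and B to the
-- preceding header line's value — with duplicate header keys the dict has already collapsed
-- the duplicates, so which header owns the fold is accidental and neither value is specified.
def Pre_parse_sip_headers (headers_str : String) : Prop :=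
  let ls := PySem.Chars.splitOn headers_str.toList pvCRLF
  ∀ i ∈ List.range ls.length,
    ¬ PySem.Chars.isIn pvColonSp ls[i]! → PySem.Chars.strip ls[i]! ≠ [] →
    (let ks := ((ls.take i).filter (PySem.Chars.isIn pvColonSp)).map
        fun l => l.take (PySem.Chars.find l pvColonSp).toNat;
     ks.getLast? = (PySem.List.dedup ks).getLast?)
instance (headers_str : String) : Decidable (Pre_parse_sip_headers headers_str) := by
  unfold Pre_parse_sip_headers; infer_instance

def pvWitness_parse_sip_headers : String := "A: 1\r\nB: 2\r\n c"

def Spec_parse_sip_headers (headers_str : String) (out : List (String × String)) : Prop :=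
  out = parse_sip_headers_alt headers_str
instance (headers_str : String) (out : List (String × String)) : Decidable (Spec_parse_sip_headers headers_str out) := by unfold Spec_parse_sip_headers; infer_instance

-- ===== CLAIM (what is proved, stated in full; the proofs are below) =====
def Claim_equal_parse_sip_headers : Prop := ∀ (headers_str : String), Dom_parse_sip_headers headers_str → Pre_parse_sip_headers headers_str → Spec_parse_sip_headers headers_str (parse_sip_headers headers_str)

-- ===== LEMMAS AND PROOFS =====

-- proof-side helpers: pvKeyScan extracts a header line's key (chars before the first ': ');
-- pvBadFrom re-states the Pre_ violation as a left fold used by the induction;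
-- pvBstep is the FORWARD characterisation of B's reverse scan (continuations attach to
-- the immediately preceding emitted pair); pvAttach appends text to the last pair's value.
def pvKeyScan : List Char → Option (List Char)
  | [] => none
  | c :: rest =>
      if pvColonSp.isPrefixOf (c :: rest) then some []
      else (pvKeyScan rest).map (fun k => c :: k)

def pvIsCont (line : List Char) : Bool :=
  (pvKeyScan line).isNone && !(PySem.Chars.strip line).isEmpty

def pvBadFrom (acc : List (List Char)) : List (List Char) → Bool
  | [] => false
  | l :: t =>
      (pvIsCont l && (acc.getLast? != (PySem.List.dedup acc).getLast?)) ||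
      pvBadFrom (acc ++ (pvKeyScan l).toList) t

def pvBstep (pairs : List (List Char × List Char)) (line : List Char) :
    List (List Char × List Char) :=
  if PySem.Chars.isIn pvColonSp line then
    match PySem.Chars.splitOnMax line pvColonSp 1 with
    | [key, value] => pairs ++ [(key, value)]
    | _ => pairs
  else if 0 < (PySem.Chars.strip line).length then
    match pairs.getLast? with
    | some (k, v) => pairs.dropLast ++ [(k, v ++ ' ' :: PySem.Chars.strip line)]
    | none => pairs
  else pairs

def pvAttach (ps : List (List Char × List Char)) (p : List Char) :
    List (List Char × List Char) :=
  match ps.getLast? with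
  | some (k, v) => ps.dropLast ++ [(k, v ++ p)]
  | none => ps

lemma pvAttach_nil (ps : List (List Char × List Char)) : pvAttach ps [] = ps := by
  unfold pvAttach
  rcases h : ps.getLast? with _ | ⟨k, v⟩
  · rfl
  · obtain ⟨q, rfl⟩ := List.getLast?_eq_some_iff.mp h
    rw [List.getLast?_concat] at h
    cases h
    simp

lemma pvAttach_concat (ps : List (List Char × List Char)) (k v p : List Char) :
    pvAttach (ps ++ [(k, v)]) p = ps ++ [(k, v ++ p)] := by
  unfold pvAttach
  simp

lemma pvAttach_attach (ps : List (List Char × List Char)) (q p : List Char) :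
    pvAttach (pvAttach ps q) p = pvAttach ps (q ++ p) := by
  rcases h : ps.getLast? with _ | ⟨k, v⟩
  · have hnil : ps = [] := List.getLast?_eq_none_iff.mp h
    subst hnil; rfl
  · obtain ⟨r, rfl⟩ := List.getLast?_eq_some_iff.mp h
    rw [List.getLast?_concat] at h
    cases h
    rw [show pvAttach (r ++ [(k, v)]) q = r ++ [(k, v ++ q)] from pvAttach_concat r k v q,
        pvAttach_concat, pvAttach_concat, List.append_assoc]

lemma pvDictOf_append_singleton (ps : List (List Char × List Char)) (k v : List Char) :
    pvDictOf (ps ++ [(k, v)]) = (pvDictOf ps).insert k v := by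
  simp [pvDictOf, List.foldl_append]

lemma pvKeys_pvDictOf (ps : List (List Char × List Char)) :
    (pvDictOf ps).keys = PySem.List.dedup (ps.map Prod.fst) := by
  unfold pvDictOf
  rw [PySem.Dict.keys_foldl_insert_key ps (key := Prod.fst) (f := fun _ x => x.2)
        (d := PySem.Dict.empty)]
  simp [PySem.Set.update, PySem.Set.ofList_eq_foldl, PySem.Dict.keys_empty]

lemma pvKeyScan_isSome_iff (l : List Char) :
    (pvKeyScan l).isSome = true ↔ PySem.Chars.isIn pvColonSp l = true := by
  rw [PySem.Chars.isIn_iff_infix]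
  induction l with
  | nil => simp [pvKeyScan, pvColonSp]
  | cons c rest ih =>
    rw [List.infix_cons_iff]
    by_cases hp : pvColonSp.isPrefixOf (c :: rest) = true
    · simp [pvKeyScan, hp, List.isPrefixOf_iff_prefix.mp hp]
    · have hp2 : ¬ pvColonSp <+: c :: rest := fun hx => hp (List.isPrefixOf_iff_prefix.mpr hx)
      simp [pvKeyScan, hp, hp2, ih]

lemma pvKeyScan_eq_none (l : List Char) (h : ¬ PySem.Chars.isIn pvColonSp l = true) :
    pvKeyScan l = none := by
  cases hsc : pvKeyScan l with
  | none => rfl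
  | some k => exact absurd ((pvKeyScan_isSome_iff l).mp (by simp [hsc])) h

lemma pvGo_zero (sep : List Char) (fuel : Nat) (l cur : List Char) (acc : List (List Char)) :
    PySem.Chars.splitOnMax.go sep fuel 0 l cur acc = acc.reverse ++ [cur.reverse ++ l] := by
  cases fuel with
  | zero => simp [PySem.Chars.splitOnMax.go]
  | succ f => cases l with
    | nil => simp [PySem.Chars.splitOnMax.go]
    | cons c rest => simp [PySem.Chars.splitOnMax.go]

lemma pvGo_one_some : ∀ (l k : List Char), pvKeyScan l = some k → ∀ (fuel : Nat),
    l.length < fuel → ∀ (cur : List Char) (acc : List (List Char)),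
    ∃ v, PySem.Chars.splitOnMax.go pvColonSp fuel 1 l cur acc =
      acc.reverse ++ [cur.reverse ++ k, v] := by
  intro l
  induction l with
  | nil => intro k hk; simp [pvKeyScan] at hk
  | cons c rest ih =>
    intro k hk fuel hf cur acc
    cases fuel with
    | zero => omega
    | succ f =>
      simp only [pvKeyScan] at hk
      by_cases hp : pvColonSp.isPrefixOf (c :: rest) = true
      · simp only [hp, if_true, Option.some.injEq] at hk
        refine ⟨(c :: rest).drop pvColonSp.length, ?_⟩
        rw [show PySem.Chars.splitOnMax.go pvColonSp (f + 1) 1 (c :: rest) cur acc =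
              PySem.Chars.splitOnMax.go pvColonSp f 0 ((c :: rest).drop pvColonSp.length) []
                (cur.reverse :: acc) by
            simp [PySem.Chars.splitOnMax.go, hp]]
        rw [pvGo_zero]
        simp [← hk]
      · simp [hp] at hk
        obtain ⟨k', hk', rfl⟩ := hk
        rw [show PySem.Chars.splitOnMax.go pvColonSp (f + 1) 1 (c :: rest) cur acc =
              PySem.Chars.splitOnMax.go pvColonSp f 1 rest (c :: cur) acc by
            simp [PySem.Chars.splitOnMax.go, hp]]
        obtain ⟨v, hv⟩ := ih k' hk' f (by simpa using Nat.lt_of_succ_lt_succ hf) (c :: cur) acc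
        exact ⟨v, by rw [hv]; simp⟩

lemma pvSplit_header (l k : List Char) (h : pvKeyScan l = some k) :
    ∃ v, PySem.Chars.splitOnMax l pvColonSp 1 = [k, v] := by
  obtain ⟨v, hv⟩ := pvGo_one_some l k h (l.length + 1) (by omega) [] []
  refine ⟨v, ?_⟩
  simpa [PySem.Chars.splitOnMax] using hv

-- case lemmas for pvBstep, used to relate it to the reverse scan
lemma pvBstep_header (ps : List (List Char × List Char)) (l k v : List Char)
    (h1 : PySem.Chars.isIn pvColonSp l = true)
    (hv : PySem.Chars.splitOnMax l pvColonSp 1 = [k, v]) :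
    pvBstep ps l = ps ++ [(k, v)] := by
  unfold pvBstep
  rw [if_pos h1, hv]

lemma pvBstep_cont (ps : List (List Char × List Char)) (l : List Char)
    (h1 : ¬ PySem.Chars.isIn pvColonSp l = true) (h2 : 0 < (PySem.Chars.strip l).length) :
    pvBstep ps l = pvAttach ps (' ' :: PySem.Chars.strip l) := by
  unfold pvBstep pvAttach
  rw [if_neg h1, if_pos h2]

lemma pvBstep_blank (ps : List (List Char × List Char)) (l : List Char)
    (h1 : ¬ PySem.Chars.isIn pvColonSp l = true) (h2 : ¬ 0 < (PySem.Chars.strip l).length) :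
    pvBstep ps l = ps := by
  unfold pvBstep
  rw [if_neg h1, if_neg h2]

-- key lemma: B's reverse scan equals the forward fold pvBstep (with pending attached)
lemma pvRevScan_spec (ls : List (List Char)) : ∀ p,
    (pvRevScan ls.reverse p).reverse = pvAttach (ls.foldl pvBstep []) p := by
  induction ls using List.reverseRecOn with
  | nil => intro p; simp [pvRevScan, pvAttach]
  | append_singleton init l ih =>
    intro p
    rw [List.reverse_append, List.reverse_singleton, List.singleton_append,
        List.foldl_append, List.foldl_cons, List.foldl_nil]
    by_cases h1 : PySem.Chars.isIn pvColonSp l = true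
    · obtain ⟨k, hk⟩ := Option.isSome_iff_exists.mp ((pvKeyScan_isSome_iff l).mpr h1)
      obtain ⟨v, hv⟩ := pvSplit_header l k hk
      rw [show pvRevScan (l :: init.reverse) p = (k, v ++ p) :: pvRevScan init.reverse [] by
            simp only [pvRevScan, h1, hv, if_true],
          pvBstep_header _ _ _ _ h1 hv, List.reverse_cons, ih [], pvAttach_nil,
          pvAttach_concat]
    · by_cases h2 : 0 < (PySem.Chars.strip l).length
      · rw [show pvRevScan (l :: init.reverse) p
              = pvRevScan init.reverse ((' ' :: PySem.Chars.strip l) ++ p) by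
              simp [pvRevScan, h1, h2],
            pvBstep_cont _ _ h1 h2, ih, pvAttach_attach]
      · rw [show pvRevScan (l :: init.reverse) p = pvRevScan init.reverse p by
              simp [pvRevScan, h1, h2],
            pvBstep_blank _ _ h1 h2, ih]

lemma pvMapFst_pvBstep (ps : List (List Char × List Char)) (l : List Char) :
    (pvBstep ps l).map Prod.fst = ps.map Prod.fst ++ (pvKeyScan l).toList := by
  unfold pvBstep
  split_ifs with h1 h2
  · obtain ⟨k, hk⟩ := Option.isSome_iff_exists.mp ((pvKeyScan_isSome_iff l).mpr h1)
    obtain ⟨v, hv⟩ := pvSplit_header l k hk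
    rw [hv, hk]
    simp
  · rw [pvKeyScan_eq_none l h1]
    rcases hq : ps.getLast? with _ | ⟨k0, v0⟩
    · simp
    · obtain ⟨q, rfl⟩ := List.getLast?_eq_some_iff.mp hq
      rw [List.getLast?_concat] at hq
      simp
  · rw [pvKeyScan_eq_none l h1]
    simp

lemma pvStep_eq (ps : List (List Char × List Char)) (l : List Char)
    (h : pvIsCont l = true →
      (ps.map Prod.fst).getLast? = (PySem.List.dedup (ps.map Prod.fst)).getLast?) :
    pvAstep (pvDictOf ps) l = pvDictOf (pvBstep ps l) := by
  unfold pvAstep pvBstep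
  split_ifs with h1 h2
  · obtain ⟨k, hk⟩ := Option.isSome_iff_exists.mp ((pvKeyScan_isSome_iff l).mpr h1)
    obtain ⟨v, hv⟩ := pvSplit_header l k hk
    rw [hv]
    simp [pvDictOf_append_singleton]
  · have hcont : pvIsCont l = true := by
      simp only [pvIsCont, pvKeyScan_eq_none l h1, Option.isNone_none, Bool.true_and,
        Bool.not_eq_true', List.isEmpty_eq_false_iff]
      exact List.ne_nil_of_length_pos h2
    have hk := h hcont
    rcases hq : ps.getLast? with _ | ⟨k0, v0⟩
    · have hnil : ps = [] := List.getLast?_eq_none_iff.mp hq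
      subst hnil
      simp [pvDictOf, PySem.List.pyGet?]
    · obtain ⟨q, rfl⟩ := List.getLast?_eq_some_iff.mp hq
      have hlast : ((q ++ [(k0, v0)]).map Prod.fst).getLast? = some k0 := by
        simp
      have hded : (PySem.List.dedup ((q ++ [(k0, v0)]).map Prod.fst)).getLast? = some k0 := by
        rw [← hk, hlast]
      have hkeys : PySem.List.pyGet? (pvDictOf (q ++ [(k0, v0)])).keys (-1) = some k0 := by
        rw [PySem.List.pyGet?_neg_one, pvKeys_pvDictOf, hded]
      rw [hkeys]
      simp only [List.dropLast_concat]
      rw [pvDictOf_append_singleton, pvDictOf_append_singleton]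
      simp [PySem.Dict.modify, PySem.Dict.getD_insert_self, PySem.Dict.insert_insert_self]
  · rfl

lemma pvKeyScan_eq_take (l : List Char) (n : Nat) (hn : pvColonSp <+: l.drop n)
    (h : ∀ i < n, ¬ pvColonSp <+: l.drop i) : pvKeyScan l = some (l.take n) := by
  induction l generalizing n with
  | nil =>
    rw [List.drop_nil] at hn
    exact absurd hn (by decide)
  | cons c rest ih =>
    cases n with
    | zero =>
      have hp : pvColonSp.isPrefixOf (c :: rest) = true :=
        List.isPrefixOf_iff_prefix.mpr (by simpa using hn)
      simp [pvKeyScan, hp]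
    | succ n' =>
      have hp : pvColonSp.isPrefixOf (c :: rest) = false := by
        rw [Bool.eq_false_iff]
        intro hb
        exact h 0 (Nat.succ_pos _) (by simpa using List.isPrefixOf_iff_prefix.mp hb)
      rw [show pvKeyScan (c :: rest) = (pvKeyScan rest).map (fun k => c :: k) by
        simp [pvKeyScan, hp]]
      rw [ih n' (by simpa using hn) (fun i hi => by simpa using h (i + 1) (by omega))]
      simp

lemma pvKey_take_find (l : List Char) (h : pvColonSp <:+: l) :
    pvKeyScan l = some (l.take (PySem.Chars.find l pvColonSp).toNat) := by
  have hnn : 0 ≤ PySem.Chars.find l pvColonSp := (PySem.Chars.find_nonneg_iff l pvColonSp).mpr h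
  obtain ⟨hpre, hmin⟩ := PySem.Chars.find_spec hnn
  exact pvKeyScan_eq_take l _ hpre hmin

lemma pvKS_filterMap (p : List (List Char)) :
    (p.filter (PySem.Chars.isIn pvColonSp)).map
        (fun l => l.take (PySem.Chars.find l pvColonSp).toNat) = p.filterMap pvKeyScan := by
  induction p with
  | nil => rfl
  | cons l t ih =>
    cases hb : PySem.Chars.isIn pvColonSp l with
    | true =>
      have hl : pvColonSp <:+: l := (PySem.Chars.isIn_iff_infix pvColonSp l).mp hb
      simp [hb, pvKey_take_find l hl, ih]
    | false =>
      have hn : pvKeyScan l = none := pvKeyScan_eq_none l (by simp [hb])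
      simp [hb, hn, ih]

lemma pvBad_exists : ∀ (suf pre : List (List Char)),
    pvBadFrom (pre.filterMap pvKeyScan) suf = true →
    ∃ j ∈ List.range suf.length, pvIsCont suf[j]! = true ∧
      ((pre ++ suf.take j).filterMap pvKeyScan).getLast? ≠
        (PySem.List.dedup ((pre ++ suf.take j).filterMap pvKeyScan)).getLast? := by
  intro suf
  induction suf with
  | nil => intro pre h; simp [pvBadFrom] at h
  | cons l t ih =>
    intro pre h
    simp only [pvBadFrom, Bool.or_eq_true] at h
    rcases h with h | h
    · cases hICl : pvIsCont l with
      | false => rw [hICl] at h; simp at h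
      | true =>
        rw [hICl, Bool.true_and] at h
        refine ⟨0, by simp, hICl, ?_⟩
        simpa using bne_iff_ne.mp h
    · have h' : pvBadFrom ((pre ++ [l]).filterMap pvKeyScan) t = true := by
        simpa [List.filterMap_append] using h
      obtain ⟨j, hj, hc, hk⟩ := ih (pre ++ [l]) h'
      refine ⟨j + 1, by simp at hj ⊢; omega, by simpa using hc, ?_⟩
      simpa [List.append_assoc] using hk

lemma pvMain (ls : List (List Char)) : ∀ ps : List (List Char × List Char),
    pvBadFrom (ps.map Prod.fst) ls = false →
    ls.foldl pvAstep (pvDictOf ps) = pvDictOf (ls.foldl pvBstep ps) := by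
  induction ls with
  | nil => intro ps _; rfl
  | cons l t ih =>
    intro ps h
    simp only [pvBadFrom, Bool.or_eq_false_iff] at h
    simp only [List.foldl_cons]
    rw [pvStep_eq ps l ?_, ih (pvBstep ps l) ?_]
    · rw [pvMapFst_pvBstep]
      exact h.2
    · intro hcont
      have h1 := h.1
      rw [hcont, Bool.true_and, bne_eq_false_iff_eq] at h1
      exact h1

-- ===== VERDICT (by name: the statement is the Claim_ definition above) =====
theorem parse_sip_headers_spec : Claim_equal_parse_sip_headers := by
  intro s _ hpre
  unfold Spec_parse_sip_headers parse_sip_headers parse_sip_headers_alt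
  have hb : pvBadFrom (([] : List (List Char × List Char)).map Prod.fst)
      (PySem.Chars.splitOn s.toList pvCRLF) = false := by
    rw [Bool.eq_false_iff]
    intro hbt
    obtain ⟨j, hj, hc, hk⟩ :=
      pvBad_exists (PySem.Chars.splitOn s.toList pvCRLF) [] (by simpa using hbt)
    simp only [pvIsCont, Bool.and_eq_true, Option.isNone_iff_eq_none, Bool.not_eq_true',
      List.isEmpty_eq_false_iff] at hc
    apply hk
    have hni : ¬ PySem.Chars.isIn pvColonSp ((PySem.Chars.splitOn s.toList pvCRLF)[j]!) := by
      intro hin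
      have hs : (pvKeyScan ((PySem.Chars.splitOn s.toList pvCRLF)[j]!)).isSome = true :=
        (pvKeyScan_isSome_iff _).mpr hin
      rw [hc.1] at hs
      simp at hs
    have heq := hpre j hj hni hc.2
    simp only [pvKS_filterMap] at heq
    simpa using heq
  rw [pvRevScan_spec (PySem.Chars.splitOn s.toList pvCRLF) [], pvAttach_nil,
      show (PySem.Dict.empty : PySem.Dict (List Char) (List Char)) = pvDictOf [] from rfl,
      pvMain _ [] hb]
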